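-- pv_equiv track=rewrite | github.com/simensandhaug/TDT4120 | exercise_3/largest_cuboid.py | _calc_max_volume
-- ===== SOURCE A (Python) =====
-- def _calc_max_volume(matrix, r_start, c_start, r_end, c_end, memo, global_min=None):
--     cached_result = memo.get((r_start, c_start, r_end, c_end))
--     if cached_result is not None:
--         return cached_result
--
--     if r_end <= r_start or c_end <= c_start:
--         memo[(r_start, c_start, r_end, c_end)] = 0
--         return 0
--
--     total_cells = (r_end - r_start) * (c_end - c_start)
--
--     if total_cells == 1:
--         cell_value = matrix[r_start][c_start]
--         memo[(r_start, c_start, r_end, c_end)] = cell_value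
--         return cell_value
--
--     min_row, min_col, local_min = _find_local_min(matrix, r_start, c_start, r_end, c_end, global_min)
--
--     if min_row is None or min_col is None:
--         return 0
--
--     if global_min is None:
--         global_min = local_min
--
--     opt1 = total_cells * local_min
--     opt2 = _calc_max_volume(matrix, r_start, c_start, min_row, c_end, memo, global_min=global_min)
--     opt3 = _calc_max_volume(matrix, r_start, c_start, r_end, min_col, memo, global_min=global_min)
--     opt4 = _calc_max_volume(matrix, min_row + 1, c_start, r_end, c_end, memo, global_min=global_min)
--
--     max_volume = max(opt1, opt2, opt3, opt4)
--     memo[(r_start, c_start, r_end, c_end)] = max_volume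
--     return max_volume
--
-- def _find_local_min(matrix, r_start, c_start, r_end, c_end, global_min):
--     local_min = float("inf")
--     min_row, min_col = None, None
--     for row in range(r_start, r_end):
--         for col in range(c_start, c_end):
--             cell_value = matrix[row][col]
--             if cell_value < local_min:
--                 if cell_value == global_min:
--                     return row, col, global_min
--
--                 local_min = cell_value
--                 min_row, min_col = row, col
--
--     return min_row, min_col, local_min
-- ===== SOURCE B (Python) =====
-- # Iterative post-order evaluation over an explicit stack instead of memoised recursion;
-- # the region minimum is found by a two-phase query (min value, then its first position).
-- # Equivalence with the original is about the RETURN value (both also fill memo in place).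
--
-- def _region_min(matrix, r_start, c_start, r_end, c_end):
--     coords = [(r, c) for r in range(r_start, r_end) for c in range(c_start, c_end)]
--     m = min(matrix[r][c] for r, c in coords)
--     r, c = next((r, c) for r, c in coords if matrix[r][c] == m)
--     return r, c, m
--
--
-- def _calc_max_volume(matrix, r_start, c_start, r_end, c_end, memo, global_min=None):
--     stack = [(r_start, c_start, r_end, c_end, False)]
--     while stack:
--         rs, cs, re, ce, ready = stack.pop()
--         key = (rs, cs, re, ce)
--         if key in memo:
--             continue
--         if re <= rs or ce <= cs:
--             memo[key] = 0
--             continue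
--         cells = (re - rs) * (ce - cs)
--         if cells == 1:
--             memo[key] = matrix[rs][cs]
--             continue
--         mr, mc, m = _region_min(matrix, rs, cs, re, ce)
--         subs = [(rs, cs, mr, ce), (rs, cs, re, mc), (mr + 1, cs, re, ce)]
--         if ready:
--             memo[key] = max(cells * m, *(memo[s] for s in subs))
--         else:
--             stack.append((rs, cs, re, ce, True))
--             stack.extend(s + (False,) for s in subs)
--     return memo[(r_start, c_start, r_end, c_end)]
-- ===== Notes on version B (the rewrite author's own statement) =====
-- stated objective: alternative
-- what changed: The memoised recursion with a stateful early-exiting record scan threading global_min is replaced by an iterative explicit-stack post-order evaluation of the rectangle DAG that ignores global_min and finds each region minimum by a two-phase query (min value, then its first position); …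
-- outside the precondition, e.g. on _calc_max_volume([[5, 3, 1]], 0, 0, 1, 3, {}, 3): A returns 9, B returns 6
import Mathlib
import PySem

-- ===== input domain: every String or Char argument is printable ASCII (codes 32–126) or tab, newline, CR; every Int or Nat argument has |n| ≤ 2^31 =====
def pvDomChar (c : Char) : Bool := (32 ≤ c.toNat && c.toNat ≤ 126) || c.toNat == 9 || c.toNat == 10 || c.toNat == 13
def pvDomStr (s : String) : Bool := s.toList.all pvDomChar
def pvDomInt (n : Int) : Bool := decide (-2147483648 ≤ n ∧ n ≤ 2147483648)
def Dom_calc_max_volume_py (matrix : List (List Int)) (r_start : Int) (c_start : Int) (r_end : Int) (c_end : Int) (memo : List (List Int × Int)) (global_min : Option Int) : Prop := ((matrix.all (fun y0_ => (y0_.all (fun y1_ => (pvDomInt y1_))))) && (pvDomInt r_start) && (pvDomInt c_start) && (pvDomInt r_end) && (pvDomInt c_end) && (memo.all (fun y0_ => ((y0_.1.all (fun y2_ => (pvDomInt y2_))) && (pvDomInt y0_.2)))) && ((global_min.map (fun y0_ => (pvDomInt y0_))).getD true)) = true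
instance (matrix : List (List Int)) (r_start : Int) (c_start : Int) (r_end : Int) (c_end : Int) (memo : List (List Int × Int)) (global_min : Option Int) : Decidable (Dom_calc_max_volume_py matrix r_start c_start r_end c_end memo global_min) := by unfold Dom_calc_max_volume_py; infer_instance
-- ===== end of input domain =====

-- B replaces A's memoised recursion (with its early-exiting record scan threading global_min)
-- by an iterative explicit-stack post-order evaluation whose region minimum is a two-phase
-- query; equivalence is about the RETURN value only (both Pythons also fill memo in place).

-- shared transliterations of 'matrix[row][col]' (exact where the access is in range — Pre_
-- guarantees every performed access is) and of the nested 'for row …: for col …' enumeration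
def pvCell (matrix : List (List Int)) (r c : Int) : Int :=
  (PySem.List.pyGet? ((PySem.List.pyGet? matrix r).getD []) c).getD 0

def pvCoords (rs cs re ce : Int) : List (Int × Int) :=
  (PySem.List.pyRange rs re 1).flatMap (fun r => (PySem.List.pyRange cs ce 1).map (fun c => (r, c)))

-- ===== PORT A =====
-- _find_local_min: running-minimum scan with early return when a new record equals global_min
def findLocalMinA (matrix : List (List Int)) (g : Option Int) :
    List (Int × Int) → Option Int → Option Int → Option Int →
    Option Int × Option Int × Option Int
  | [], mr, mc, lm => (mr, mc, lm)
  | (row, col) :: rest, mr, mc, lm =>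
    let v := pvCell matrix row col
    if Option.all (fun m => decide (v < m)) lm then   -- cell_value < local_min (None = inf)
      if g = some v then (some row, some col, g)      -- cell_value == global_min: early return
      else findLocalMinA matrix g rest (some row) (some col) (some v)
    else findLocalMinA matrix g rest mr mc lm

-- _calc_max_volume, with the mutated memo dict threaded through; fuel only guards the
-- recursion (it strictly dominates the shrinking (rows+cols) measure, so 0 is never reached
-- from the top-level call)
def calcA (matrix : List (List Int)) :
    Nat → Int → Int → Int → Int → PySem.Dict (List Int) Int → Option Int →
    Int × PySem.Dict (List Int) Int
  | 0, _, _, _, _, memo, _ => (0, memo)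
  | fuel+1, rs, cs, re, ce, memo, g =>
    let key := [rs, cs, re, ce]
    match PySem.Dict.get? memo key with
    | some v => (v, memo)
    | none =>
      if re ≤ rs ∨ ce ≤ cs then (0, PySem.Dict.insert memo key 0)
      else
        let cells := (re - rs) * (ce - cs)
        if cells = 1 then
          let v := pvCell matrix rs cs
          (v, PySem.Dict.insert memo key v)
        else
          match findLocalMinA matrix g (pvCoords rs cs re ce) none none none with
          | (some mr, some mc, lm) =>
            let lmv := lm.getD 0       -- local_min is an int whenever min_row is not None
            let g' := match g with | none => some lmv | some x => some x
            let opt1 := cells * lmv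
            let (opt2, memo2) := calcA matrix fuel rs cs mr ce memo g'
            let (opt3, memo3) := calcA matrix fuel rs cs re mc memo2 g'
            let (opt4, memo4) := calcA matrix fuel (mr+1) cs re ce memo3 g'
            let res := max (max (max opt1 opt2) opt3) opt4
            (res, PySem.Dict.insert memo4 key res)
          | _ => (0, memo)             -- 'if min_row is None or min_col is None: return 0'

def calc_max_volume_py (matrix : List (List Int)) (r_start : Int) (c_start : Int) (r_end : Int) (c_end : Int) (memo : List (List Int × Int)) (global_min : Option Int) : Int :=
  (calcA matrix ((r_end - r_start).toNat + (c_end - c_start).toNat + 1)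
    r_start c_start r_end c_end (PySem.Dict.ofList memo) global_min).1

-- ===== PORT B =====
-- _region_min: two-phase query — minimum value of the region, then its first position
def regionMin (matrix : List (List Int)) (rs cs re ce : Int) : Int × Int × Int :=
  let L := pvCoords rs cs re ce
  let m := (PySem.List.min? (L.map (fun p => pvCell matrix p.1 p.2)) (fun x => x)).getD 0
    -- min(...) raises on an empty region; callers only call this on nonempty regions
  let q := (L.find? (fun p => pvCell matrix p.1 p.2 == m)).getD (0, 0)
    -- next(...): the minimum is attained, so the default is never used
  (q.1, q.2, m)

-- rows+cols measure of a rectangle, and facts about regionMin the stack loop's termination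
-- measure needs (cited by name in decreasing_by)
def pvMu (rs cs re ce : Int) : Nat := (re - rs).toNat + (ce - cs).toNat

lemma mem_pvCoords (rs cs re ce : Int) (p : Int × Int) :
    p ∈ pvCoords rs cs re ce ↔ (rs ≤ p.1 ∧ p.1 < re) ∧ (cs ≤ p.2 ∧ p.2 < ce) := by
  obtain ⟨r, c⟩ := p
  simp [pvCoords, List.mem_flatMap, PySem.List.mem_pyRange_one]

lemma pvCoords_cons (rs cs re ce : Int) (h1 : rs < re) (h2 : cs < ce) :
    ∃ t, pvCoords rs cs re ce = (rs, cs) :: t := by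
  unfold pvCoords
  rw [PySem.List.pyRange_one_cons h1, PySem.List.pyRange_one_cons h2]
  exact ⟨_, rfl⟩

lemma regionMin_eq (matrix : List (List Int)) (rs cs re ce : Int)
    (h1 : rs < re) (h2 : cs < ce) :
    ∃ q m,
      PySem.List.min? ((pvCoords rs cs re ce).map (fun p => pvCell matrix p.1 p.2)) (fun x => x) = some m ∧
      (pvCoords rs cs re ce).find? (fun p => pvCell matrix p.1 p.2 == m) = some q ∧
      regionMin matrix rs cs re ce = (q.1, q.2, m) := by
  obtain ⟨t, hco⟩ := pvCoords_cons rs cs re ce h1 h2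
  have hmin : ∃ m, PySem.List.min? ((pvCoords rs cs re ce).map (fun p => pvCell matrix p.1 p.2)) (fun x => x) = some m := by
    rw [hco, List.map_cons, PySem.List.min?_id_cons]
    exact ⟨_, rfl⟩
  obtain ⟨m, hm⟩ := hmin
  have hmem : m ∈ (pvCoords rs cs re ce).map (fun p => pvCell matrix p.1 p.2) :=
    PySem.List.min?_mem hm
  obtain ⟨p0, hp0, hp0v⟩ := List.mem_map.mp hmem
  have hfs : ((pvCoords rs cs re ce).find? (fun p => pvCell matrix p.1 p.2 == m)).isSome := by
    rw [List.find?_isSome]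
    exact ⟨p0, hp0, by simp [hp0v]⟩
  obtain ⟨q, hq⟩ := Option.isSome_iff_exists.mp hfs
  refine ⟨q, m, hm, hq, ?_⟩
  simp [regionMin, hm, hq]

lemma regionMin_bounds (matrix : List (List Int)) (rs cs re ce : Int)
    (h1 : rs < re) (h2 : cs < ce) :
    (rs ≤ (regionMin matrix rs cs re ce).1 ∧ (regionMin matrix rs cs re ce).1 < re) ∧
    (cs ≤ (regionMin matrix rs cs re ce).2.1 ∧ (regionMin matrix rs cs re ce).2.1 < ce) := by
  obtain ⟨q, m, _, hq, hval⟩ := regionMin_eq matrix rs cs re ce h1 h2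
  have hqmem := List.mem_of_find?_eq_some hq
  rw [mem_pvCoords] at hqmem
  rw [hval]
  exact hqmem

-- weight of a stack frame / stack: unready frames weigh twice a ready frame of the same
-- rectangle; subrectangles are strictly lighter, so each loop step shrinks the total weight
def pvW (f : Int × Int × Int × Int × Bool) : Nat :=
  (if f.2.2.2.2 then 1 else 2) * 7 ^ pvMu f.1 f.2.1 f.2.2.1 f.2.2.2.1

def pvSW (st : List (Int × Int × Int × Int × Bool)) : Nat := (st.map pvW).sum

lemma pvW_pos (f : Int × Int × Int × Int × Bool) : 0 < pvW f := by
  unfold pvW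
  have : 0 < 7 ^ pvMu f.1 f.2.1 f.2.2.1 f.2.2.2.1 := Nat.pow_pos (by norm_num)
  split <;> omega

lemma pvPush_lt (m1 m2 m3 m : Nat) (h1 : m1 < m) (h2 : m2 < m) (h3 : m3 < m) (R : Nat) :
    2 * 7 ^ m3 + (2 * 7 ^ m2 + (2 * 7 ^ m1 + (1 * 7 ^ m + R))) < 2 * 7 ^ m + R := by
  obtain ⟨k, rfl⟩ : ∃ k, m = k + 1 := ⟨m - 1, by omega⟩
  have e : (7 : Nat) ^ (k + 1) = 7 ^ k * 7 := pow_succ 7 k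
  have b1 : 7 ^ m1 ≤ 7 ^ k := Nat.pow_le_pow_right (by norm_num) (by omega)
  have b2 : 7 ^ m2 ≤ 7 ^ k := Nat.pow_le_pow_right (by norm_num) (by omega)
  have b3 : 7 ^ m3 ≤ 7 ^ k := Nat.pow_le_pow_right (by norm_num) (by omega)
  have hp : 0 < 7 ^ k := Nat.pow_pos (by norm_num)
  omega

-- the while-loop over the explicit stack: pop a frame, resolve it or push its children
def runB (matrix : List (List Int)) (st : List (Int × Int × Int × Int × Bool))
    (memo : PySem.Dict (List Int) Int) : PySem.Dict (List Int) Int :=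
  match st with
  | [] => memo
  | (rs, cs, re, ce, ready) :: rest =>
    let key := [rs, cs, re, ce]
    if (PySem.Dict.get? memo key).isSome then runB matrix rest memo
    else if hdeg : re ≤ rs ∨ ce ≤ cs then runB matrix rest (PySem.Dict.insert memo key 0)
    else if (re - rs) * (ce - cs) = 1 then
      runB matrix rest (PySem.Dict.insert memo key (pvCell matrix rs cs))
    else
      let t := regionMin matrix rs cs re ce
      if ready then
        let v := max (max (max ((re - rs) * (ce - cs) * t.2.2)
            (PySem.Dict.getD memo [rs, cs, t.1, ce] 0))
            (PySem.Dict.getD memo [rs, cs, re, t.2.1] 0))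
            (PySem.Dict.getD memo [t.1 + 1, cs, re, ce] 0)
        runB matrix rest (PySem.Dict.insert memo key v)
      else
        runB matrix ((t.1 + 1, cs, re, ce, false) :: (rs, cs, re, t.2.1, false) ::
          (rs, cs, t.1, ce, false) :: (rs, cs, re, ce, true) :: rest) memo
termination_by pvSW st
decreasing_by
  · simp only [pvSW, List.map_cons, List.sum_cons]
    have := pvW_pos (rs, cs, re, ce, ready); omega
  · simp only [pvSW, List.map_cons, List.sum_cons]
    have := pvW_pos (rs, cs, re, ce, ready); omega
  · simp only [pvSW, List.map_cons, List.sum_cons]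
    have := pvW_pos (rs, cs, re, ce, ready); omega
  · simp only [pvSW, List.map_cons, List.sum_cons]
    have := pvW_pos (rs, cs, re, ce, ready); omega
  · obtain ⟨⟨ha, hb⟩, hc, hd⟩ := regionMin_bounds matrix rs cs re ce (by omega) (by omega)
    cases ready
    · simp only [pvSW, List.map_cons, List.sum_cons, pvW, pvMu, Bool.false_eq_true, if_false]
      apply pvPush_lt <;> omega
    · exact absurd rfl ‹¬(true = true)›

def calc_max_volume_py_alt (matrix : List (List Int)) (r_start : Int) (c_start : Int) (r_end : Int) (c_end : Int) (memo : List (List Int × Int)) (global_min : Option Int) : Int :=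
  let M := runB matrix [(r_start, c_start, r_end, c_end, false)] (PySem.Dict.ofList memo)
  (PySem.Dict.get? M [r_start, c_start, r_end, c_end]).getD 0
    -- 'return memo[key]': the loop always leaves the key present, so the default is never used

-- ===== PRECONDITION & SPEC =====
-- Pre_ excludes (a) out-of-bounds rectangles, on which the Python A raises IndexError (or, on
-- a few, returns only because its early-exit scan stops before the first bad index while B's
-- whole-region scan raises), and (b) calls whose supplied global_min exceeds some cell of the
-- rectangle, where A's early exit can report that inconsistent global_min instead of the
-- region minimum — a scan-order artefact on a parameter that in A's own recursion is always
-- the minimum of an enclosing rectangle.  (The max/min clamps below are identity under the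
-- stated bounds; they only keep the condition cheap to evaluate on arbitrary integers.)
def Pre_calc_max_volume_py (matrix : List (List Int)) (r_start : Int) (c_start : Int) (r_end : Int) (c_end : Int) (memo : List (List Int × Int)) (global_min : Option Int) : Prop :=
  r_end ≤ r_start ∨ c_end ≤ c_start ∨
  (PySem.Dict.get? (PySem.Dict.ofList memo) [r_start, c_start, r_end, c_end]) ≠ none ∨
  (-(matrix.length : Int) ≤ r_start ∧ r_end ≤ (matrix.length : Int) ∧
   (∀ r ∈ PySem.List.pyRange (max r_start (-(matrix.length : Int))) (min r_end (matrix.length : Int)) 1,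
     -(((PySem.List.pyGet? matrix r).getD []).length : Int) ≤ c_start ∧
     c_end ≤ (((PySem.List.pyGet? matrix r).getD []).length : Int)) ∧
   (global_min.all (fun g0 =>
     (PySem.List.pyRange (max r_start (-(matrix.length : Int))) (min r_end (matrix.length : Int)) 1).all (fun r =>
       (PySem.List.pyRange (max c_start (-(((PySem.List.pyGet? matrix r).getD []).length : Int)))
           (min c_end (((PySem.List.pyGet? matrix r).getD []).length : Int)) 1).all (fun c =>
         decide (g0 ≤ pvCell matrix r c))))) = true)
instance (matrix : List (List Int)) (r_start : Int) (c_start : Int) (r_end : Int) (c_end : Int) (memo : List (List Int × Int)) (global_min : Option Int) : Decidable (Pre_calc_max_volume_py matrix r_start c_start r_end c_end memo global_min) := by unfold Pre_calc_max_volume_py; infer_instance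

def pvWitness_calc_max_volume_py : List (List Int) × Int × Int × Int × Int × (List (List Int × Int)) × Option Int :=
  ([[1, 2], [3, 4]], 0, 0, 2, 2, [], none)

def Spec_calc_max_volume_py (matrix : List (List Int)) (r_start : Int) (c_start : Int) (r_end : Int) (c_end : Int) (memo : List (List Int × Int)) (global_min : Option Int) (out : Int) : Prop := out = calc_max_volume_py_alt matrix r_start c_start r_end c_end memo global_min
instance (matrix : List (List Int)) (r_start : Int) (c_start : Int) (r_end : Int) (c_end : Int) (memo : List (List Int × Int)) (global_min : Option Int) (out : Int) : Decidable (Spec_calc_max_volume_py matrix r_start c_start r_end c_end memo global_min out) := by unfold Spec_calc_max_volume_py; infer_instance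

-- ===== CLAIM (what is proved, stated in full; the proofs are below) =====
def Claim_equal_calc_max_volume_py : Prop := ∀ (matrix : List (List Int)) (r_start : Int) (c_start : Int) (r_end : Int) (c_end : Int) (memo : List (List Int × Int)) (global_min : Option Int), Dom_calc_max_volume_py matrix r_start c_start r_end c_end memo global_min → Pre_calc_max_volume_py matrix r_start c_start r_end c_end memo global_min → Spec_calc_max_volume_py matrix r_start c_start r_end c_end memo global_min (calc_max_volume_py matrix r_start c_start r_end c_end memo global_min)

-- ===== LEMMAS AND PROOFS =====

-- the canonical value of a rectangle: its memo0 entry if present, else the max-volume recurrence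
def pvV (matrix : List (List Int)) (memo0 : PySem.Dict (List Int) Int) (rs cs re ce : Int) : Int :=
  match PySem.Dict.get? memo0 [rs, cs, re, ce] with
  | some v => v
  | none =>
    if hdeg : re ≤ rs ∨ ce ≤ cs then 0
    else if (re - rs) * (ce - cs) = 1 then pvCell matrix rs cs
    else
      let t := regionMin matrix rs cs re ce
      max (max (max ((re - rs) * (ce - cs) * t.2.2)
        (pvV matrix memo0 rs cs t.1 ce))
        (pvV matrix memo0 rs cs re t.2.1))
        (pvV matrix memo0 (t.1 + 1) cs re ce)
termination_by pvMu rs cs re ce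
decreasing_by
  all_goals
    obtain ⟨⟨ha, hb⟩, hc, hd⟩ := regionMin_bounds matrix rs cs re ce (by omega) (by omega)
    simp only [pvMu]
    omega

lemma pvV_of_some (matrix : List (List Int)) (memo0 : PySem.Dict (List Int) Int)
    (rs cs re ce v : Int) (h : PySem.Dict.get? memo0 [rs, cs, re, ce] = some v) :
    pvV matrix memo0 rs cs re ce = v := by
  rw [pvV, h]


lemma pvV_of_none (matrix : List (List Int)) (memo0 : PySem.Dict (List Int) Int)
    (rs cs re ce : Int) (h : PySem.Dict.get? memo0 [rs, cs, re, ce] = none) :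
    pvV matrix memo0 rs cs re ce =
      if re ≤ rs ∨ ce ≤ cs then 0
      else if (re - rs) * (ce - cs) = 1 then pvCell matrix rs cs
      else
        max (max (max ((re - rs) * (ce - cs) * (regionMin matrix rs cs re ce).2.2)
          (pvV matrix memo0 rs cs (regionMin matrix rs cs re ce).1 ce))
          (pvV matrix memo0 rs cs re (regionMin matrix rs cs re ce).2.1))
          (pvV matrix memo0 ((regionMin matrix rs cs re ce).1 + 1) cs re ce) := by
  rw [pvV, h]
  dsimp only
  by_cases hdeg : re ≤ rs ∨ ce ≤ cs
  · rw [dif_pos hdeg, if_pos hdeg]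
  · rw [dif_neg hdeg, if_neg hdeg]

-- a memo dict is good when it extends memo0 (as a lookup table) and every rectangle entry
-- carries that rectangle's canonical value
def pvGood (matrix : List (List Int)) (memo0 M : PySem.Dict (List Int) Int) : Prop :=
  (∀ (J : List Int) (v : Int), PySem.Dict.get? memo0 J = some v → PySem.Dict.get? M J = some v) ∧
  (∀ (rs cs re ce v : Int), PySem.Dict.get? M [rs, cs, re, ce] = some v →
    v = pvV matrix memo0 rs cs re ce)

lemma pvGood_insert (matrix : List (List Int)) (memo0 M : PySem.Dict (List Int) Int)
    (h : pvGood matrix memo0 M) (rs cs re ce : Int) :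
    pvGood matrix memo0
      (PySem.Dict.insert M [rs, cs, re, ce] (pvV matrix memo0 rs cs re ce)) := by
  constructor
  · intro J v hJ
    rw [PySem.Dict.get?_insert]
    split
    · next heq =>
      subst heq
      rw [pvV_of_some matrix memo0 rs cs re ce v hJ]
    · exact h.1 J v hJ
  · intro a b c d v hv
    rw [PySem.Dict.get?_insert] at hv
    split at hv
    · next heq =>
      obtain ⟨rfl, rfl, rfl, rfl⟩ : a = rs ∧ b = cs ∧ c = re ∧ d = ce := by
        simpa using heq
      exact (Option.some.injEq _ _ ▸ hv).symm ▸ rfl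
    · exact h.2 a b c d v hv

lemma get?_insert_preserve (M : PySem.Dict (List Int) Int) (key : List Int) (w : Int)
    (hnone : PySem.Dict.get? M key = none) (J : List Int) (v : Int)
    (h : PySem.Dict.get? M J = some v) :
    PySem.Dict.get? (PySem.Dict.insert M key w) J = some v := by
  rw [PySem.Dict.get?_insert]
  split
  · next heq => subst heq; rw [hnone] at h; cases h
  · exact h

-- the global_min argument is consistent: it never exceeds a cell of the rectangle
def pvGok (matrix : List (List Int)) (g : Option Int) (rs cs re ce : Int) : Prop :=
  ∀ g0, g = some g0 → ∀ p ∈ pvCoords rs cs re ce, g0 ≤ pvCell matrix p.1 p.2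

lemma pvCoords_subset (rs cs re ce rs' cs' re' ce' : Int)
    (h : rs ≤ rs' ∧ re' ≤ re ∧ cs ≤ cs' ∧ ce' ≤ ce) :
    ∀ p ∈ pvCoords rs' cs' re' ce', p ∈ pvCoords rs cs re ce := by
  intro p hp
  rw [mem_pvCoords] at hp ⊢
  omega

lemma regionMin_isMin (matrix : List (List Int)) (rs cs re ce : Int)
    (h1 : rs < re) (h2 : cs < ce) :
    ∀ p ∈ pvCoords rs cs re ce,
      (regionMin matrix rs cs re ce).2.2 ≤ pvCell matrix p.1 p.2 := by
  obtain ⟨q, m, hm, hq, hval⟩ := regionMin_eq matrix rs cs re ce h1 h2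
  rw [hval]
  intro p hp
  exact PySem.List.min?_isMin hm _ (List.mem_map_of_mem hp)

-- characterisation of A's running-minimum scan (no early exit can fire when global_min is None)
lemma findA_none_noimprove (matrix : List (List Int)) :
    ∀ (L : List (Int × Int)) (r c m : Int),
      (∀ p ∈ L, m ≤ pvCell matrix p.1 p.2) →
      findLocalMinA matrix none L (some r) (some c) (some m) = (some r, some c, some m) := by
  intro L
  induction L with
  | nil => intro r c m _; simp [findLocalMinA]
  | cons p t ih =>
    intro r c m h
    obtain ⟨row, col⟩ := p
    have h1 := h (row, col) (List.mem_cons_self)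
    simp only [findLocalMinA, Option.all_some, decide_eq_true_eq]
    rw [if_neg (not_lt.mpr h1)]
    exact ih r c m (fun p hp => h p (List.mem_cons_of_mem _ hp))

lemma findA_none_char (matrix : List (List Int)) (M : Int) (q : Int × Int) :
    ∀ (L : List (Int × Int)) (r c m : Int),
      (∀ p ∈ L, M ≤ pvCell matrix p.1 p.2) →
      (L.find? (fun p => pvCell matrix p.1 p.2 == M) = some q) →
      findLocalMinA matrix none L (some r) (some c) (some m) =
        if M < m then (some q.1, some q.2, some M) else (some r, some c, some m) := by
  intro L
  induction L with
  | nil => intro r c m _ hq; simp at hq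
  | cons p t ih =>
    intro r c m hM hq
    obtain ⟨row, col⟩ := p
    have hMp := hM (row, col) (List.mem_cons_self)
    have hMt : ∀ p ∈ t, M ≤ pvCell matrix p.1 p.2 :=
      fun p hp' => hM p (List.mem_cons_of_mem _ hp')
    rw [List.find?_cons] at hq
    simp only [findLocalMinA, Option.all_some, decide_eq_true_eq]
    by_cases hp : pvCell matrix row col = M
    · simp only [hp, beq_self_eq_true] at hq
      have hq' : q = (row, col) := by cases hq; rfl
      subst hq'
      simp only [hp]
      by_cases hlt : M < m
      · rw [if_pos hlt, if_neg (by simp), if_pos hlt]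
        exact findA_none_noimprove matrix t row col M hMt
      · rw [if_neg hlt, if_neg hlt]
        exact findA_none_noimprove matrix t r c m
          (fun p hp' => le_trans (by omega) (hMt p hp'))
    · have hbne : (pvCell matrix row col == M) = false := by simp [hp]
      rw [hbne] at hq
      have hMlt : M < pvCell matrix row col := lt_of_le_of_ne hMp (fun h => hp h.symm)
      by_cases hlt : pvCell matrix row col < m
      · rw [if_pos hlt, if_neg (by simp)]
        rw [ih row col (pvCell matrix row col) hMt hq]
        rw [if_pos hMlt, if_pos (lt_trans hMlt hlt)]
      · rw [if_neg hlt]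
        rw [ih r c m hMt hq]

lemma findA_none_step (matrix : List (List Int)) (row col : Int) (t : List (Int × Int)) :
    ∀ (r c m : Int), findLocalMinA matrix none ((row, col) :: t) (some r) (some c) (some m) =
      if pvCell matrix row col < m then
        findLocalMinA matrix none t (some row) (some col) (some (pvCell matrix row col))
      else findLocalMinA matrix none t (some r) (some c) (some m) := by
  intro r c m
  simp only [findLocalMinA, Option.all_some, decide_eq_true_eq]
  by_cases hlt : pvCell matrix row col < m
  · rw [if_pos hlt, if_pos hlt, if_neg (by simp)]
  · rw [if_neg hlt, if_neg hlt]

lemma findA_some_char (matrix : List (List Int)) (g0 : Int) :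
    ∀ (L : List (Int × Int)) (r c m : Int),
      findLocalMinA matrix (some g0) L (some r) (some c) (some m) =
        match L.find? (fun p => decide (pvCell matrix p.1 p.2 ≤ g0)) with
        | some h => if pvCell matrix h.1 h.2 = g0 ∧ g0 < m then (some h.1, some h.2, some g0)
                    else findLocalMinA matrix none L (some r) (some c) (some m)
        | none => findLocalMinA matrix none L (some r) (some c) (some m) := by
  intro L
  induction L with
  | nil => intro r c m; simp [findLocalMinA]
  | cons p t ih =>
    intro r c m
    obtain ⟨row, col⟩ := p
    rw [List.find?_cons]
    by_cases hle : pvCell matrix row col ≤ g0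
    · simp only [hle, decide_true]
      by_cases heq : pvCell matrix row col = g0
      · by_cases hlt : pvCell matrix row col < m
        · dsimp only
          rw [if_pos ⟨heq, by omega⟩]
          simp only [findLocalMinA, Option.all_some, decide_eq_true_eq, Option.some.injEq]
          rw [if_pos hlt, if_pos heq.symm]
        · dsimp only
          rw [if_neg (by rw [heq]; omega), findA_none_step, if_neg hlt]
          simp only [findLocalMinA, Option.all_some, decide_eq_true_eq, Option.some.injEq]
          rw [if_neg hlt, ih r c m]
          cases hft : t.find? (fun x => decide (pvCell matrix x.1 x.2 ≤ g0)) with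
          | none => rfl
          | some h' =>
            dsimp only
            rw [if_neg (by rw [heq] at hlt; omega)]
      · have hslt : pvCell matrix row col < g0 := lt_of_le_of_ne hle heq
        by_cases hlt : pvCell matrix row col < m
        · dsimp only
          rw [if_neg (fun hh => heq hh.1), findA_none_step, if_pos hlt]
          simp only [findLocalMinA, Option.all_some, decide_eq_true_eq, Option.some.injEq]
          rw [if_pos hlt, if_neg (fun hh => heq hh.symm), ih row col (pvCell matrix row col)]
          cases hft : t.find? (fun x => decide (pvCell matrix x.1 x.2 ≤ g0)) with
          | none => rfl
          | some h' => dsimp only; rw [if_neg (by omega)]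
        · dsimp only
          rw [if_neg (fun hh => heq hh.1), findA_none_step, if_neg hlt]
          simp only [findLocalMinA, Option.all_some, decide_eq_true_eq, Option.some.injEq]
          rw [if_neg hlt, ih r c m]
          cases hft : t.find? (fun x => decide (pvCell matrix x.1 x.2 ≤ g0)) with
          | none => rfl
          | some h' => dsimp only; rw [if_neg (by omega)]
    · simp only [hle, decide_false]
      have hgs : g0 < pvCell matrix row col := by omega
      by_cases hlt : pvCell matrix row col < m
      · rw [findA_none_step, if_pos hlt]
        simp only [findLocalMinA, Option.all_some, decide_eq_true_eq, Option.some.injEq]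
        rw [if_pos hlt, if_neg (by omega), ih row col (pvCell matrix row col)]
        cases hft : t.find? (fun x => decide (pvCell matrix x.1 x.2 ≤ g0)) with
        | none => rfl
        | some h' =>
          dsimp only
          by_cases hc1 : pvCell matrix h'.1 h'.2 = g0
          · rw [if_pos ⟨hc1, by omega⟩, if_pos ⟨hc1, by omega⟩]
          · rw [if_neg (fun hh => hc1 hh.1), if_neg (fun hh => hc1 hh.1)]
      · rw [findA_none_step, if_neg hlt]
        simp only [findLocalMinA, Option.all_some, decide_eq_true_eq, Option.some.injEq]
        rw [if_neg hlt, ih r c m]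

lemma findA_none_step0 (matrix : List (List Int)) (row col : Int) (t : List (Int × Int)) :
    findLocalMinA matrix none ((row, col) :: t) none none none =
      findLocalMinA matrix none t (some row) (some col) (some (pvCell matrix row col)) := by
  simp [findLocalMinA]

lemma findA_none_top (matrix : List (List Int)) (M : Int) (q p : Int × Int) (t : List (Int × Int))
    (hM : ∀ x ∈ p :: t, M ≤ pvCell matrix x.1 x.2)
    (hq : (p :: t).find? (fun x => pvCell matrix x.1 x.2 == M) = some q) :
    findLocalMinA matrix none (p :: t) none none none = (some q.1, some q.2, some M) := by
  obtain ⟨row, col⟩ := p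
  rw [List.find?_cons] at hq
  rw [findA_none_step0]
  by_cases hp : pvCell matrix row col = M
  · simp only [hp, beq_self_eq_true] at hq
    have hq' : q = (row, col) := by simpa using hq.symm
    subst hq'
    rw [hp]
    exact findA_none_noimprove matrix t row col M (fun x hx => hM x (List.mem_cons_of_mem _ hx))
  · have hbne : (pvCell matrix row col == M) = false := by simp [hp]
    simp only [hbne] at hq
    have hMlt : M < pvCell matrix row col :=
      lt_of_le_of_ne (hM _ List.mem_cons_self) (fun h => hp h.symm)
    rw [findA_none_char matrix M q t row col _ (fun x hx => hM x (List.mem_cons_of_mem _ hx)) hq,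
      if_pos hMlt]

lemma findA_some_step0 (matrix : List (List Int)) (g0 row col : Int) (t : List (Int × Int)) :
    findLocalMinA matrix (some g0) ((row, col) :: t) none none none =
      if g0 = pvCell matrix row col then (some row, some col, some g0)
      else findLocalMinA matrix (some g0) t (some row) (some col) (some (pvCell matrix row col)) := by
  simp only [findLocalMinA, Option.all_none, if_true, Option.some.injEq]

lemma findA_some_top (matrix : List (List Int)) (g0 : Int) (p : Int × Int) (t : List (Int × Int)) :
    findLocalMinA matrix (some g0) (p :: t) none none none =
      match (p :: t).find? (fun x => decide (pvCell matrix x.1 x.2 ≤ g0)) with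
      | some h => if pvCell matrix h.1 h.2 = g0 then (some h.1, some h.2, some g0)
                  else findLocalMinA matrix none (p :: t) none none none
      | none => findLocalMinA matrix none (p :: t) none none none := by
  obtain ⟨row, col⟩ := p
  rw [List.find?_cons, findA_some_step0]
  by_cases heq : pvCell matrix row col = g0
  · simp [heq]
  · by_cases hle : pvCell matrix row col ≤ g0
    · have hslt : pvCell matrix row col < g0 := lt_of_le_of_ne hle heq
      simp only [hle, decide_true]
      rw [if_neg heq, if_neg (fun hh => heq hh.symm), findA_some_char, findA_none_step0]
      cases hft : t.find? (fun x => decide (pvCell matrix x.1 x.2 ≤ g0)) with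
      | none => rfl
      | some h' => dsimp only; rw [if_neg (by omega)]
    · have hgs : g0 < pvCell matrix row col := by omega
      simp only [hle, decide_false]
      rw [if_neg (by omega), findA_some_char]
      cases hft : t.find? (fun x => decide (pvCell matrix x.1 x.2 ≤ g0)) with
      | none => dsimp only; rw [findA_none_step0]
      | some h' =>
        dsimp only
        by_cases hc1 : pvCell matrix h'.1 h'.2 = g0
        · rw [if_pos ⟨hc1, by omega⟩, if_pos hc1]
        · rw [if_neg (fun hh => hc1 hh.1), if_neg hc1, findA_none_step0]

lemma pvFind?_congr {α : Type} (l : List α) (p q : α → Bool) (h : ∀ a ∈ l, p a = q a) :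
    l.find? p = l.find? q := by
  induction l with
  | nil => rfl
  | cons x t ih =>
    rw [List.find?_cons, List.find?_cons, h x List.mem_cons_self]
    cases hq : q x
    · rw [ih (fun a ha => h a (List.mem_cons_of_mem _ ha))]
    · rfl

-- under a consistent global_min, A's scan computes exactly B's two-phase region minimum
lemma findA_gok (matrix : List (List Int)) (g : Option Int) (rs cs re ce : Int)
    (h1 : rs < re) (h2 : cs < ce) (hg : pvGok matrix g rs cs re ce) :
    findLocalMinA matrix g (pvCoords rs cs re ce) none none none =
      (some (regionMin matrix rs cs re ce).1, some (regionMin matrix rs cs re ce).2.1,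
       some (regionMin matrix rs cs re ce).2.2) := by
  obtain ⟨q, m, hm, hq, hval⟩ := regionMin_eq matrix rs cs re ce h1 h2
  obtain ⟨tl, hco⟩ := pvCoords_cons rs cs re ce h1 h2
  have hMle : ∀ x ∈ pvCoords rs cs re ce, m ≤ pvCell matrix x.1 x.2 := fun x hx =>
    PySem.List.min?_isMin hm _ (List.mem_map_of_mem hx)
  rw [hval]
  cases g with
  | none =>
    rw [hco] at hq hMle ⊢
    exact findA_none_top matrix m q _ tl hMle hq
  | some g0 =>
    have hg0 : ∀ p ∈ pvCoords rs cs re ce, g0 ≤ pvCell matrix p.1 p.2 := hg g0 rfl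
    have hmg : g0 ≤ m := by
      obtain ⟨p0, hp0, hp0v⟩ := List.mem_map.mp (PySem.List.min?_mem hm)
      rw [← hp0v]
      exact hg0 p0 hp0
    rw [hco] at hq hMle hg0 ⊢
    rw [findA_some_top]
    cases hft : ((rs, cs) :: tl).find? (fun x => decide (pvCell matrix x.1 x.2 ≤ g0)) with
    | none => exact findA_none_top matrix m q _ tl hMle hq
    | some h =>
      have hhm := List.mem_of_find?_eq_some hft
      have hle : pvCell matrix h.1 h.2 ≤ g0 := by simpa using List.find?_some hft
      have hge : g0 ≤ pvCell matrix h.1 h.2 := hg0 h hhm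
      have heq : pvCell matrix h.1 h.2 = g0 := le_antisymm hle hge
      have hmeq : m = g0 := le_antisymm (heq ▸ hMle h hhm) hmg
      dsimp only
      rw [if_pos heq]
      have hfeq : ((rs, cs) :: tl).find? (fun x => decide (pvCell matrix x.1 x.2 ≤ g0)) =
          ((rs, cs) :: tl).find? (fun x => pvCell matrix x.1 x.2 == m) := by
        apply pvFind?_congr
        intro x hx
        have hxg := hg0 x hx
        rw [hmeq]
        by_cases hxx : pvCell matrix x.1 x.2 = g0
        · simp [hxx]
        · simp [hxx, show ¬(pvCell matrix x.1 x.2 ≤ g0) from by omega]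
      rw [hfeq, hq] at hft
      cases hft
      rw [hmeq]

-- A's memoised recursion computes the canonical value and keeps the memo good
lemma calcA_correct (matrix : List (List Int)) (memo0 : PySem.Dict (List Int) Int) :
    ∀ (fuel : Nat) (rs cs re ce : Int) (M : PySem.Dict (List Int) Int) (g : Option Int),
      pvMu rs cs re ce < fuel →
      pvGok matrix g rs cs re ce →
      pvGood matrix memo0 M →
      (calcA matrix fuel rs cs re ce M g).1 = pvV matrix memo0 rs cs re ce ∧
      pvGood matrix memo0 (calcA matrix fuel rs cs re ce M g).2 := by
  intro fuel
  induction fuel with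
  | zero => intro rs cs re ce M g hfu; omega
  | succ fuel ih =>
    intro rs cs re ce M g hfu hgok hgood
    simp only [calcA]
    cases hk : PySem.Dict.get? M [rs, cs, re, ce] with
    | some v =>
      exact ⟨(hgood.2 rs cs re ce v hk).symm ▸ rfl, hgood⟩
    | none =>
      have hk0 : PySem.Dict.get? memo0 [rs, cs, re, ce] = none := by
        cases h0 : PySem.Dict.get? memo0 [rs, cs, re, ce] with
        | none => rfl
        | some w => rw [hgood.1 _ _ h0] at hk; cases hk
      by_cases hdeg : re ≤ rs ∨ ce ≤ cs
      · rw [if_pos hdeg]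
        have hV : pvV matrix memo0 rs cs re ce = 0 := by
          rw [pvV_of_none matrix memo0 rs cs re ce hk0, if_pos hdeg]
        exact ⟨hV.symm, hV ▸ pvGood_insert matrix memo0 M hgood rs cs re ce⟩
      · rw [if_neg hdeg]
        by_cases hc1 : (re - rs) * (ce - cs) = 1
        · rw [if_pos hc1]
          have hV : pvV matrix memo0 rs cs re ce = pvCell matrix rs cs := by
            rw [pvV_of_none matrix memo0 rs cs re ce hk0, if_neg hdeg, if_pos hc1]
          exact ⟨hV.symm, hV ▸ pvGood_insert matrix memo0 M hgood rs cs re ce⟩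
        · rw [if_neg hc1]
          have h1 : rs < re := by omega
          have h2 : cs < ce := by omega
          obtain ⟨⟨ha, hb⟩, hc, hd⟩ := regionMin_bounds matrix rs cs re ce h1 h2
          have hmin := regionMin_isMin matrix rs cs re ce h1 h2
          rw [findA_gok matrix g rs cs re ce h1 h2 hgok]
          cases g with
          | none =>
            dsimp only [Option.getD_some]
            have hgok' : ∀ rs' cs' re' ce', rs ≤ rs' → re' ≤ re → cs ≤ cs' → ce' ≤ ce →
                pvGok matrix (some (regionMin matrix rs cs re ce).2.2) rs' cs' re' ce' := by
              intro rs' cs' re' ce' k1 k2 k3 k4 g0 hg0 p hp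
              cases hg0
              exact hmin p (pvCoords_subset rs cs re ce rs' cs' re' ce' ⟨k1, k2, k3, k4⟩ p hp)
            obtain ⟨e2, g2⟩ := ih rs cs (regionMin matrix rs cs re ce).1 ce M (some (regionMin matrix rs cs re ce).2.2)
              (by simp only [pvMu] at hfu ⊢; omega)
              (hgok' rs cs (regionMin matrix rs cs re ce).1 ce le_rfl (by omega) le_rfl le_rfl)
              hgood
            rcases hP2 : calcA matrix fuel rs cs (regionMin matrix rs cs re ce).1 ce M (some (regionMin matrix rs cs re ce).2.2)
              with ⟨opt2, memo2⟩
            rw [hP2] at e2 g2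
            obtain ⟨e3, g3⟩ := ih rs cs re (regionMin matrix rs cs re ce).2.1 memo2 (some (regionMin matrix rs cs re ce).2.2)
              (by simp only [pvMu] at hfu ⊢; omega)
              (hgok' rs cs re (regionMin matrix rs cs re ce).2.1 le_rfl le_rfl le_rfl (by omega))
              g2
            rcases hP3 : calcA matrix fuel rs cs re (regionMin matrix rs cs re ce).2.1 memo2 (some (regionMin matrix rs cs re ce).2.2)
              with ⟨opt3, memo3⟩
            rw [hP3] at e3 g3
            obtain ⟨e4, g4⟩ := ih ((regionMin matrix rs cs re ce).1 + 1) cs re ce memo3 (some (regionMin matrix rs cs re ce).2.2)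
              (by simp only [pvMu] at hfu ⊢; omega)
              (hgok' ((regionMin matrix rs cs re ce).1 + 1) cs re ce (by omega) le_rfl le_rfl le_rfl)
              g3
            rcases hP4 : calcA matrix fuel ((regionMin matrix rs cs re ce).1 + 1) cs re ce memo3 (some (regionMin matrix rs cs re ce).2.2)
              with ⟨opt4, memo4⟩
            rw [hP4] at e4 g4
            simp only at e2 e3 e4
            have hV : pvV matrix memo0 rs cs re ce =
                max (max (max ((re - rs) * (ce - cs) * (regionMin matrix rs cs re ce).2.2) opt2)
                  opt3) opt4 := by
              rw [pvV_of_none matrix memo0 rs cs re ce hk0, if_neg hdeg, if_neg hc1,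
                e2, e3, e4]
            exact ⟨hV.symm, hV ▸ pvGood_insert matrix memo0 memo4 g4 rs cs re ce⟩
          | some gx =>
            dsimp only [Option.getD_some]
            have hgok' : ∀ rs' cs' re' ce', rs ≤ rs' → re' ≤ re → cs ≤ cs' → ce' ≤ ce →
                pvGok matrix (some gx) rs' cs' re' ce' := by
              intro rs' cs' re' ce' k1 k2 k3 k4 g0 hg0 p hp
              cases hg0
              exact hgok gx rfl p (pvCoords_subset rs cs re ce rs' cs' re' ce' ⟨k1, k2, k3, k4⟩ p hp)
            obtain ⟨e2, g2⟩ := ih rs cs (regionMin matrix rs cs re ce).1 ce M (some gx)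
              (by simp only [pvMu] at hfu ⊢; omega)
              (hgok' rs cs (regionMin matrix rs cs re ce).1 ce le_rfl (by omega) le_rfl le_rfl)
              hgood
            rcases hP2 : calcA matrix fuel rs cs (regionMin matrix rs cs re ce).1 ce M (some gx)
              with ⟨opt2, memo2⟩
            rw [hP2] at e2 g2
            obtain ⟨e3, g3⟩ := ih rs cs re (regionMin matrix rs cs re ce).2.1 memo2 (some gx)
              (by simp only [pvMu] at hfu ⊢; omega)
              (hgok' rs cs re (regionMin matrix rs cs re ce).2.1 le_rfl le_rfl le_rfl (by omega))
              g2
            rcases hP3 : calcA matrix fuel rs cs re (regionMin matrix rs cs re ce).2.1 memo2 (some gx)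
              with ⟨opt3, memo3⟩
            rw [hP3] at e3 g3
            obtain ⟨e4, g4⟩ := ih ((regionMin matrix rs cs re ce).1 + 1) cs re ce memo3 (some gx)
              (by simp only [pvMu] at hfu ⊢; omega)
              (hgok' ((regionMin matrix rs cs re ce).1 + 1) cs re ce (by omega) le_rfl le_rfl le_rfl)
              g3
            rcases hP4 : calcA matrix fuel ((regionMin matrix rs cs re ce).1 + 1) cs re ce memo3 (some gx)
              with ⟨opt4, memo4⟩
            rw [hP4] at e4 g4
            simp only at e2 e3 e4
            have hV : pvV matrix memo0 rs cs re ce =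
                max (max (max ((re - rs) * (ce - cs) * (regionMin matrix rs cs re ce).2.2) opt2)
                  opt3) opt4 := by
              rw [pvV_of_none matrix memo0 rs cs re ce hk0, if_neg hdeg, if_neg hc1,
                e2, e3, e4]
            exact ⟨hV.symm, hV ▸ pvGood_insert matrix memo0 memo4 g4 rs cs re ce⟩

-- one-step equations of the stack loop
lemma runB_nil (matrix : List (List Int)) (M : PySem.Dict (List Int) Int) :
    runB matrix [] M = M := by
  rw [runB]

lemma runB_cons (matrix : List (List Int)) (rs cs re ce : Int) (ready : Bool)
    (rest : List (Int × Int × Int × Int × Bool)) (M : PySem.Dict (List Int) Int) :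
    runB matrix ((rs, cs, re, ce, ready) :: rest) M =
      (if (PySem.Dict.get? M [rs, cs, re, ce]).isSome then runB matrix rest M
       else if re ≤ rs ∨ ce ≤ cs then
         runB matrix rest (PySem.Dict.insert M [rs, cs, re, ce] 0)
       else if (re - rs) * (ce - cs) = 1 then
         runB matrix rest (PySem.Dict.insert M [rs, cs, re, ce] (pvCell matrix rs cs))
       else if ready = true then
         runB matrix rest (PySem.Dict.insert M [rs, cs, re, ce]
           (max (max (max ((re - rs) * (ce - cs) * (regionMin matrix rs cs re ce).2.2)
             (PySem.Dict.getD M [rs, cs, (regionMin matrix rs cs re ce).1, ce] 0))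
             (PySem.Dict.getD M [rs, cs, re, (regionMin matrix rs cs re ce).2.1] 0))
             (PySem.Dict.getD M [(regionMin matrix rs cs re ce).1 + 1, cs, re, ce] 0)))
       else
         runB matrix (((regionMin matrix rs cs re ce).1 + 1, cs, re, ce, false) ::
           (rs, cs, re, (regionMin matrix rs cs re ce).2.1, false) ::
           (rs, cs, (regionMin matrix rs cs re ce).1, ce, false) ::
           (rs, cs, re, ce, true) :: rest) M) := by
  rw [runB]
  rfl

-- pushing a frame's children strictly shrinks the stack weight
lemma pvSW_push (matrix : List (List Int)) (rs cs re ce : Int)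
    (rest : List (Int × Int × Int × Int × Bool)) (hdeg : ¬(re ≤ rs ∨ ce ≤ cs)) :
    pvSW (((regionMin matrix rs cs re ce).1 + 1, cs, re, ce, false) ::
        (rs, cs, re, (regionMin matrix rs cs re ce).2.1, false) ::
        (rs, cs, (regionMin matrix rs cs re ce).1, ce, false) ::
        (rs, cs, re, ce, true) :: rest) <
      pvSW ((rs, cs, re, ce, false) :: rest) := by
  obtain ⟨⟨ha, hb⟩, hc, hd⟩ := regionMin_bounds matrix rs cs re ce (by omega) (by omega)
  simp only [pvSW, List.map_cons, List.sum_cons, pvW, pvMu, Bool.false_eq_true, if_false]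
  apply pvPush_lt <;> omega

-- the loop only looks at the top of the stack: a prefix is processed first
lemma runB_append (matrix : List (List Int)) :
    ∀ (n : Nat) (a : List (Int × Int × Int × Int × Bool)), pvSW a ≤ n →
      ∀ (b : List (Int × Int × Int × Int × Bool)) (M : PySem.Dict (List Int) Int),
        runB matrix (a ++ b) M = runB matrix b (runB matrix a M) := by
  intro n
  induction n with
  | zero =>
    intro a ha b M
    have hnil : a = [] := by
      cases a with
      | nil => rfl
      | cons f t => exfalso; have := pvW_pos f; simp [pvSW] at ha; omega
    subst hnil
    rw [List.nil_append, runB_nil]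
  | succ n ih =>
    intro a ha b M
    cases a with
    | nil => rw [List.nil_append, runB_nil]
    | cons f t =>
      obtain ⟨rs, cs, re, ce, ready⟩ := f
      have hwt : 0 < pvW (rs, cs, re, ce, ready) := pvW_pos _
      have hta : pvSW t ≤ n := by
        simp only [pvSW, List.map_cons, List.sum_cons] at ha
        simp only [pvSW]
        omega
      rw [List.cons_append]
      conv_lhs => rw [runB_cons]
      conv_rhs => rw [runB_cons]
      by_cases hsome : (PySem.Dict.get? M [rs, cs, re, ce]).isSome
      · rw [if_pos hsome, if_pos hsome, ih t hta b M]
      · rw [if_neg hsome, if_neg hsome]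
        by_cases hdeg : re ≤ rs ∨ ce ≤ cs
        · rw [if_pos hdeg, if_pos hdeg, ih t hta b _]
        · rw [if_neg hdeg, if_neg hdeg]
          by_cases hc1 : (re - rs) * (ce - cs) = 1
          · rw [if_pos hc1, if_pos hc1, ih t hta b _]
          · rw [if_neg hc1, if_neg hc1]
            cases ready with
            | true =>
              rw [if_pos rfl, if_pos rfl, ih t hta b _]
            | false =>
              rw [if_neg (by simp), if_neg (by simp)]
              rw [show ((regionMin matrix rs cs re ce).1 + 1, cs, re, ce, false) ::
                  (rs, cs, re, (regionMin matrix rs cs re ce).2.1, false) ::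
                  (rs, cs, (regionMin matrix rs cs re ce).1, ce, false) ::
                  (rs, cs, re, ce, true) :: (t ++ b) =
                  (((regionMin matrix rs cs re ce).1 + 1, cs, re, ce, false) ::
                  (rs, cs, re, (regionMin matrix rs cs re ce).2.1, false) ::
                  (rs, cs, (regionMin matrix rs cs re ce).1, ce, false) ::
                  (rs, cs, re, ce, true) :: t) ++ b from by simp]
              apply ih
              have hlt := pvSW_push matrix rs cs re ce t hdeg
              simp only [pvSW, List.map_cons, List.sum_cons] at ha hlt ⊢
              omega

-- resolving one unready frame leaves a good memo that extends the old one and contains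
-- the frame's canonical value
lemma runB_resolve (matrix : List (List Int)) (memo0 : PySem.Dict (List Int) Int) :
    ∀ (n : Nat) (rs cs re ce : Int), pvMu rs cs re ce ≤ n →
      ∀ (M : PySem.Dict (List Int) Int), pvGood matrix memo0 M →
        pvGood matrix memo0 (runB matrix [(rs, cs, re, ce, false)] M) ∧
        (∀ (J : List Int) (v : Int), PySem.Dict.get? M J = some v →
          PySem.Dict.get? (runB matrix [(rs, cs, re, ce, false)] M) J = some v) ∧
        PySem.Dict.get? (runB matrix [(rs, cs, re, ce, false)] M) [rs, cs, re, ce] =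
          some (pvV matrix memo0 rs cs re ce) := by
  intro n
  induction n with
  | zero =>
    intro rs cs re ce hmu M hgood
    have hdeg : re ≤ rs ∨ ce ≤ cs := by
      simp only [pvMu] at hmu; omega
    rw [runB_cons]
    by_cases hsome : (PySem.Dict.get? M [rs, cs, re, ce]).isSome
    · rw [if_pos hsome, runB_nil]
      obtain ⟨v, hv⟩ := Option.isSome_iff_exists.mp hsome
      exact ⟨hgood, fun J w h => h, by rw [hv, hgood.2 rs cs re ce v hv]⟩
    · rw [if_neg hsome, if_pos hdeg, runB_nil]
      have hknone : PySem.Dict.get? M [rs, cs, re, ce] = none :=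
        Option.not_isSome_iff_eq_none.mp hsome
      have hk0 : PySem.Dict.get? memo0 [rs, cs, re, ce] = none := by
        cases h0 : PySem.Dict.get? memo0 [rs, cs, re, ce] with
        | none => rfl
        | some w => rw [hgood.1 _ _ h0] at hknone; cases hknone
      have hV : pvV matrix memo0 rs cs re ce = 0 := by
        rw [pvV_of_none matrix memo0 rs cs re ce hk0, if_pos hdeg]
      refine ⟨hV ▸ pvGood_insert matrix memo0 M hgood rs cs re ce,
        fun J w h => get?_insert_preserve M _ _ hknone J w h, ?_⟩
      rw [PySem.Dict.get?_insert_self, hV]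
  | succ n ih =>
    intro rs cs re ce hmu M hgood
    rw [runB_cons]
    by_cases hsome : (PySem.Dict.get? M [rs, cs, re, ce]).isSome
    · rw [if_pos hsome, runB_nil]
      obtain ⟨v, hv⟩ := Option.isSome_iff_exists.mp hsome
      exact ⟨hgood, fun J w h => h, by rw [hv, hgood.2 rs cs re ce v hv]⟩
    · rw [if_neg hsome]
      have hknone : PySem.Dict.get? M [rs, cs, re, ce] = none :=
        Option.not_isSome_iff_eq_none.mp hsome
      have hk0 : PySem.Dict.get? memo0 [rs, cs, re, ce] = none := by
        cases h0 : PySem.Dict.get? memo0 [rs, cs, re, ce] with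
        | none => rfl
        | some w => rw [hgood.1 _ _ h0] at hknone; cases hknone
      by_cases hdeg : re ≤ rs ∨ ce ≤ cs
      · rw [if_pos hdeg, runB_nil]
        have hV : pvV matrix memo0 rs cs re ce = 0 := by
          rw [pvV_of_none matrix memo0 rs cs re ce hk0, if_pos hdeg]
        refine ⟨hV ▸ pvGood_insert matrix memo0 M hgood rs cs re ce,
          fun J w h => get?_insert_preserve M _ _ hknone J w h, ?_⟩
        rw [PySem.Dict.get?_insert_self, hV]
      · rw [if_neg hdeg]
        by_cases hc1 : (re - rs) * (ce - cs) = 1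
        · rw [if_pos hc1, runB_nil]
          have hV : pvV matrix memo0 rs cs re ce = pvCell matrix rs cs := by
            rw [pvV_of_none matrix memo0 rs cs re ce hk0, if_neg hdeg, if_pos hc1]
          refine ⟨hV ▸ pvGood_insert matrix memo0 M hgood rs cs re ce,
            fun J w h => get?_insert_preserve M _ _ hknone J w h, ?_⟩
          rw [PySem.Dict.get?_insert_self, hV]
        · rw [if_neg hc1, if_neg (by simp)]
          obtain ⟨⟨ha, hb⟩, hc, hd⟩ := regionMin_bounds matrix rs cs re ce (by omega) (by omega)
          -- peel the four pushed frames off one at a time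
          rw [show ((regionMin matrix rs cs re ce).1 + 1, cs, re, ce, false) ::
              (rs, cs, re, (regionMin matrix rs cs re ce).2.1, false) ::
              (rs, cs, (regionMin matrix rs cs re ce).1, ce, false) ::
              (rs, cs, re, ce, true) :: ([] : List (Int × Int × Int × Int × Bool)) =
              [((regionMin matrix rs cs re ce).1 + 1, cs, re, ce, false)] ++
              ([(rs, cs, re, (regionMin matrix rs cs re ce).2.1, false)] ++
              ([(rs, cs, (regionMin matrix rs cs re ce).1, ce, false)] ++
              [(rs, cs, re, ce, true)])) from rfl]
          rw [runB_append matrix (pvSW [((regionMin matrix rs cs re ce).1 + 1, cs, re, ce, false)]) _ le_rfl]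
          rw [runB_append matrix (pvSW [(rs, cs, re, (regionMin matrix rs cs re ce).2.1, false)]) _ le_rfl]
          rw [runB_append matrix (pvSW [(rs, cs, (regionMin matrix rs cs re ce).1, ce, false)]) _ le_rfl]
          obtain ⟨g1, m1, l1⟩ := ih ((regionMin matrix rs cs re ce).1 + 1) cs re ce
            (by simp only [pvMu] at hmu ⊢; omega) M hgood
          obtain ⟨g2, m2, l2⟩ := ih rs cs re (regionMin matrix rs cs re ce).2.1
            (by simp only [pvMu] at hmu ⊢; omega) _ g1
          obtain ⟨g3, m3, l3⟩ := ih rs cs (regionMin matrix rs cs re ce).1 ce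
            (by simp only [pvMu] at hmu ⊢; omega) _ g2
          set M3 := runB matrix [(rs, cs, (regionMin matrix rs cs re ce).1, ce, false)]
            (runB matrix [(rs, cs, re, (regionMin matrix rs cs re ce).2.1, false)]
              (runB matrix [((regionMin matrix rs cs re ce).1 + 1, cs, re, ce, false)] M)) with hM3
          rw [runB_cons]
          by_cases hsome3 : (PySem.Dict.get? M3 [rs, cs, re, ce]).isSome
          · rw [if_pos hsome3, runB_nil]
            obtain ⟨v, hv⟩ := Option.isSome_iff_exists.mp hsome3
            exact ⟨g3, fun J w h => m3 _ _ (m2 _ _ (m1 _ _ h)),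
              by rw [hv, g3.2 rs cs re ce v hv]⟩
          · have hknone3 : PySem.Dict.get? M3 [rs, cs, re, ce] = none :=
              Option.not_isSome_iff_eq_none.mp hsome3
            rw [if_neg hsome3, if_neg hdeg, if_neg hc1, if_pos rfl, runB_nil]
            have hv1 : PySem.Dict.getD M3 [rs, cs, (regionMin matrix rs cs re ce).1, ce] 0 =
                pvV matrix memo0 rs cs (regionMin matrix rs cs re ce).1 ce := by
              rw [PySem.Dict.getD_eq_get?_getD, l3]
              rfl
            have hv2 : PySem.Dict.getD M3 [rs, cs, re, (regionMin matrix rs cs re ce).2.1] 0 =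
                pvV matrix memo0 rs cs re (regionMin matrix rs cs re ce).2.1 := by
              rw [PySem.Dict.getD_eq_get?_getD, m3 _ _ l2]
              rfl
            have hv3 : PySem.Dict.getD M3 [(regionMin matrix rs cs re ce).1 + 1, cs, re, ce] 0 =
                pvV matrix memo0 ((regionMin matrix rs cs re ce).1 + 1) cs re ce := by
              rw [PySem.Dict.getD_eq_get?_getD, m3 _ _ (m2 _ _ l1)]
              rfl
            have hV : pvV matrix memo0 rs cs re ce =
                max (max (max ((re - rs) * (ce - cs) * (regionMin matrix rs cs re ce).2.2)
                  (PySem.Dict.getD M3 [rs, cs, (regionMin matrix rs cs re ce).1, ce] 0))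
                  (PySem.Dict.getD M3 [rs, cs, re, (regionMin matrix rs cs re ce).2.1] 0))
                  (PySem.Dict.getD M3 [(regionMin matrix rs cs re ce).1 + 1, cs, re, ce] 0) := by
              rw [pvV_of_none matrix memo0 rs cs re ce hk0, if_neg hdeg, if_neg hc1,
                hv1, hv2, hv3]
            refine ⟨hV ▸ pvGood_insert matrix memo0 M3 g3 rs cs re ce,
              fun J w h => get?_insert_preserve M3 _ _ hknone3 J w
                (m3 _ _ (m2 _ _ (m1 _ _ h))), ?_⟩
            rw [PySem.Dict.get?_insert_self, hV]

theorem calc_max_volume_py_spec : Claim_equal_calc_max_volume_py := by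
  intro matrix rs cs re ce memo g _ hpre
  unfold Spec_calc_max_volume_py calc_max_volume_py calc_max_volume_py_alt
  dsimp only
  cases hk : PySem.Dict.get? (PySem.Dict.ofList memo) [rs, cs, re, ce] with
  | some v =>
    have hA : (calcA matrix ((re - rs).toNat + (ce - cs).toNat + 1) rs cs re ce
        (PySem.Dict.ofList memo) g).1 = v := by
      simp only [calcA, hk]
    have hB : (PySem.Dict.get? (runB matrix [(rs, cs, re, ce, false)]
        (PySem.Dict.ofList memo)) [rs, cs, re, ce]).getD 0 = v := by
      rw [runB_cons, if_pos (by rw [hk]; rfl), runB_nil, hk]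
      rfl
    rw [hA, hB]
  | none =>
    by_cases hdeg : re ≤ rs ∨ ce ≤ cs
    · have hA : (calcA matrix ((re - rs).toNat + (ce - cs).toNat + 1) rs cs re ce
          (PySem.Dict.ofList memo) g).1 = 0 := by
        simp only [calcA, hk]
        rw [if_pos hdeg]
      have hB : (PySem.Dict.get? (runB matrix [(rs, cs, re, ce, false)]
          (PySem.Dict.ofList memo)) [rs, cs, re, ce]).getD 0 = 0 := by
        rw [runB_cons, if_neg (by rw [hk]; simp), if_pos hdeg, runB_nil,
          PySem.Dict.get?_insert_self]
        rfl
      rw [hA, hB]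
    · rcases hpre with h | h | h | ⟨hb1, hb2, hb3, hb4⟩
      · exact absurd (Or.inl h) hdeg
      · exact absurd (Or.inr h) hdeg
      · exact absurd hk h
      · have hgok : pvGok matrix g rs cs re ce := by
          intro g0 hg0 p hp
          rw [mem_pvCoords] at hp
          subst hg0
          have hmax : max rs (-(matrix.length : Int)) = rs := max_eq_left hb1
          have hmin' : min re (matrix.length : Int) = re := min_eq_left hb2
          rw [hmax, hmin'] at hb3 hb4
          simp only [Option.all_some, List.all_eq_true, decide_eq_true_eq] at hb4
          have hr : p.1 ∈ PySem.List.pyRange rs re 1 := by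
            rw [PySem.List.mem_pyRange_one]; omega
          have hcb := hb3 p.1 hr
          have hb4' := hb4 p.1 hr
          have hcmax : max cs (-(((PySem.List.pyGet? matrix p.1).getD []).length : Int)) = cs :=
            max_eq_left hcb.1
          have hcmin : min ce (((PySem.List.pyGet? matrix p.1).getD []).length : Int) = ce :=
            min_eq_left hcb.2
          rw [hcmax, hcmin] at hb4'
          exact hb4' p.2 (by rw [PySem.List.mem_pyRange_one]; omega)
        have hgood0 : pvGood matrix (PySem.Dict.ofList memo) (PySem.Dict.ofList memo) :=
          ⟨fun J v h => h, fun a b c d v h => (pvV_of_some matrix _ a b c d v h).symm⟩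
        have hA := calcA_correct matrix (PySem.Dict.ofList memo)
          ((re - rs).toNat + (ce - cs).toNat + 1) rs cs re ce (PySem.Dict.ofList memo) g
          (by simp only [pvMu]; omega) hgok hgood0
        have hB := runB_resolve matrix (PySem.Dict.ofList memo) (pvMu rs cs re ce) rs cs re ce
          le_rfl (PySem.Dict.ofList memo) hgood0
        rw [hA.1, hB.2.2]
        rfl
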